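-- pv_equiv track=rewrite | github.com/hemalathanaredlaMAHI/CP-elective-4 | 05-happyprimes-Python/happyprimes.py | sumOfSquaresOfDigits
-- ===== SOURCE A (Python) =====
-- def sumOfSquaresOfDigits(n):
--     if(n<10):
--         return n
--     else:
--         re=0
--         while(n>0):
--             r=n%10
--             re+=(r*r)
--             n=n//10
--         return sumOfSquaresOfDigits(re)
-- ===== SOURCE B (Python) =====
-- def sumOfSquaresOfDigits(n):
--     # Iterative reformulation: flatten the tail recursion into a while loop and
--     # build the digit list first, then sum the squares.
--     while n >= 10:
--         digits = []
--         m = n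
--         while m > 0:
--             digits.append(m % 10)
--             m //= 10
--         n = sum(d * d for d in digits)
--     return n
-- ===== Notes on version B (the rewrite author's own statement) =====
-- stated objective: alternative
-- what changed: A's tail recursion with an in-place squaring accumulator is replaced by an iterative while loop whose body first builds the list of decimal digits and then sums their squares.
import Mathlib
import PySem

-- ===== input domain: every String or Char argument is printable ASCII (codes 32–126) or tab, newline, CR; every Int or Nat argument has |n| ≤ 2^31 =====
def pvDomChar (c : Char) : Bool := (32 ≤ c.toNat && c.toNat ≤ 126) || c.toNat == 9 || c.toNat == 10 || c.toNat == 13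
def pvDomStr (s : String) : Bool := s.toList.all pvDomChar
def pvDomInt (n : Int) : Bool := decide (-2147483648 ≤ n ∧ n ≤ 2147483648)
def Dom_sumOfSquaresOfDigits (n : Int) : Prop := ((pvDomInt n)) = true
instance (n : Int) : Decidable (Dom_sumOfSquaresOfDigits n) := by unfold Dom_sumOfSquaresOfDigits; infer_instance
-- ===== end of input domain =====

-- B rewrites A's tail recursion as an iterative loop that first builds the digit list and then
-- sums the squares (objective: alternative decomposition; same asymptotic cost).
-- Both ports use a fuel parameter only to make the same computation total (n.toNat + 20 rounds is
-- always enough); the algorithms are otherwise A's and B's Python step for step.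


-- ===== PORT A =====
-- A's inner 'while n > 0' loop: re += (n%10)*(n%10); n //= 10.
-- fuel = n.toNat at entry is enough: n strictly decreases every round.
def ssdLoopA : Nat → Int → Int → Int
  | 0, _, re => re
  | fuel + 1, n, re =>
    if n > 0 then
      ssdLoopA fuel (PySem.Int.floordiv n 10) (re + (PySem.Int.mod n 10) * (PySem.Int.mod n 10))
    else re

-- A's recursion: if n < 10 return n else recurse on the digit-square sum.
def outerA : Nat → Int → Int
  | 0, n => n
  | fuel + 1, n => if n < 10 then n else outerA fuel (ssdLoopA n.toNat n 0)

def sumOfSquaresOfDigits (n : Int) : Int := outerA (n.toNat + 20) n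

-- ===== PORT B =====
-- B's inner loop: digits.append(m % 10); m //= 10   (same fuel convention)
def digitsLoopB : Nat → Int → List Int → List Int
  | 0, _, digits => digits
  | fuel + 1, m, digits =>
    if m > 0 then
      digitsLoopB fuel (PySem.Int.floordiv m 10) (digits ++ [PySem.Int.mod m 10])
    else digits

-- one pass of B's while body: n = sum(d * d for d in digits)
def altStepB (n : Int) : Int := ((digitsLoopB n.toNat n []).map (fun d => d * d)).sum

-- B's 'while n >= 10' loop flattened iteration
def outerB : Nat → Int → Int
  | 0, n => n
  | fuel + 1, n => if n ≥ 10 then outerB fuel (altStepB n) else n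

def sumOfSquaresOfDigits_alt (n : Int) : Int := outerB (n.toNat + 20) n

-- ===== PRECONDITION & SPEC =====
def Spec_sumOfSquaresOfDigits (n : Int) (out : Int) : Prop := out = sumOfSquaresOfDigits_alt n
instance (n : Int) (out : Int) : Decidable (Spec_sumOfSquaresOfDigits n out) := by unfold Spec_sumOfSquaresOfDigits; infer_instance

-- ===== CLAIM (what is proved, stated in full; the proofs are below) =====
def Claim_equal_sumOfSquaresOfDigits : Prop := ∀ (n : Int), Dom_sumOfSquaresOfDigits n → Spec_sumOfSquaresOfDigits n (sumOfSquaresOfDigits n)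

-- ===== LEMMAS AND PROOFS =====
theorem digitsLoopB_append (f : Nat) (m : Int) (acc : List Int) :
    digitsLoopB f m acc = acc ++ digitsLoopB f m [] := by
  induction f generalizing m acc with
  | zero => simp [digitsLoopB]
  | succ f ih =>
    simp only [digitsLoopB]
    split
    · rw [ih (PySem.Int.floordiv m 10) (acc ++ [PySem.Int.mod m 10]),
        ih (PySem.Int.floordiv m 10) ([] ++ [PySem.Int.mod m 10])]
      simp
    · simp

-- B's digit-list pass sums to exactly what A's accumulating loop computes
theorem ssdLoopA_eq_sum (f : Nat) (n re : Int) :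
    ssdLoopA f n re = re + ((digitsLoopB f n []).map (fun d => d * d)).sum := by
  induction f generalizing n re with
  | zero => simp [ssdLoopA, digitsLoopB]
  | succ f ih =>
    simp only [ssdLoopA, digitsLoopB]
    split
    · rw [ih, digitsLoopB_append f (PySem.Int.floordiv n 10) ([] ++ [PySem.Int.mod n 10])]
      simp
      ring
    · simp

theorem altStepB_eq (n : Int) : altStepB n = ssdLoopA n.toNat n 0 := by
  rw [altStepB, ssdLoopA_eq_sum]
  ring

theorem outer_eq (f : Nat) (n : Int) : outerA f n = outerB f n := by
  induction f generalizing n with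
  | zero => rfl
  | succ f ih =>
    simp only [outerA, outerB]
    by_cases h : n < 10
    · rw [if_pos h, if_neg (by omega : ¬ n ≥ 10)]
    · rw [if_neg h, if_pos (by omega : n ≥ 10), altStepB_eq, ih]

-- ===== VERDICT (by name: the statement is the Claim_ definition above) =====
theorem sumOfSquaresOfDigits_spec : Claim_equal_sumOfSquaresOfDigits := by
  intro n _
  unfold Spec_sumOfSquaresOfDigits sumOfSquaresOfDigits sumOfSquaresOfDigits_alt
  exact outer_eq (n.toNat + 20) n
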